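-- pv_equiv track=rewrite | github.com/biuinvincible/repo-to-kgraph | src/repo_kgraph/services/retriever.py | _extract_context_snippet
-- ===== SOURCE A (Python) =====
-- def _extract_context_snippet(content: str, max_length: int = 200) -> str:
--     """Extract a context snippet from content."""
--     if not content:
--         return ""
--
--     # Take first few lines or characters
--     lines = content.split('\n')
--     snippet_lines = []
--     total_length = 0
--
--     for line in lines:
--         if total_length + len(line) > max_length:
--             break
--         snippet_lines.append(line)
--         total_length += len(line)
--
--     snippet = '\n'.join(snippet_lines)
--     if len(content) > len(snippet):
--         snippet += "..."
--
--     return snippet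
-- ===== SOURCE B (Python) =====
-- def _extract_context_snippet(content: str, max_length: int = 200) -> str:
--     """Extract a context snippet from content."""
--     if not content:
--         return ""
--
--     # Single character scan: find the cut position in content directly,
--     # without ever building the list of lines.  `cut` is the end index
--     # (exclusive) of the last whole line that fits the budget; None if none.
--     cut = None
--     used = 0   # budget consumed by committed lines (newlines excluded)
--     cur = 0    # length of the line currently being read
--     i = 0
--     for ch in content + '\n':   # sentinel newline terminates the last line
--         if ch == '\n':
--             if used + cur > max_length:
--                 break
--             used += cur
--             cut = i
--             cur = 0
--         else:
--             cur += 1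
--         i += 1
--
--     snippet = content[:cut] if cut is not None else ""
--     return snippet + "..." if len(content) > len(snippet) else snippet
-- ===== Notes on version B (the rewrite author's own statement) =====
-- stated objective: alternative
-- what changed: Replaces A's split-into-lines / accumulate / join pipeline by a single character scan over content that computes the cut index of the last fitting line directly and slices content[:cut], never building a line list.
import Mathlib
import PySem

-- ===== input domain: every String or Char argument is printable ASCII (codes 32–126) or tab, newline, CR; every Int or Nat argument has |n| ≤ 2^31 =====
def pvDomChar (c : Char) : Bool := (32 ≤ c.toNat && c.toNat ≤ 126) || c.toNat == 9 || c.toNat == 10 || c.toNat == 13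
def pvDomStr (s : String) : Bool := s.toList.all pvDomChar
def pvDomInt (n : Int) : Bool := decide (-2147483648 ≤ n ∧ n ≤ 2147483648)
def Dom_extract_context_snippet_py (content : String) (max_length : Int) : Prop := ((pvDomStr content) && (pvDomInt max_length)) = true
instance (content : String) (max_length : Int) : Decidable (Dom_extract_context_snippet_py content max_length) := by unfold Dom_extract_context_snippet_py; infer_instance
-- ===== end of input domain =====

-- B replaces A's split/accumulate/join over the list of lines by a single character
-- scan that finds the cut index directly in the content and slices it (alternative).

-- ===== PORT A =====
-- A's for-loop with break: accumulate lines while the running total stays within the budget.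
def pyA_take (max_length : Int) : List (List Char) → Int → List (List Char)
  | [], _ => []
  | l :: rest, total =>
    if max_length < total + (l.length : Int) then []
    else l :: pyA_take max_length rest (total + (l.length : Int))

def extract_context_snippet_py (content : String) (max_length : Int) : String :=
  if content = "" then ""
  else
    let lines := PySem.Chars.splitOn content.toList ['\n']
    let snippet := PySem.Chars.join ['\n'] (pyA_take max_length lines 0)
    if ((snippet.length : Int) < (content.toList.length : Int)) then String.ofList (snippet ++ "...".toList)
    else String.ofList snippet

-- ===== PORT B =====
-- Source B's single for-loop over content + '\n': state (i, used, cur, cut); the index i is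
-- threaded as the Nat position of the current character.
def altScan (max_length : Int) : List Char → Nat → Int → Int → Option Nat → Option Nat
  | [], _, _, _, cut => cut
  | c :: rest, i, used, cur, cut =>
    if c = '\n' then
      if max_length < used + cur then cut
      else altScan max_length rest (i + 1) (used + cur) 0 (some i)
    else altScan max_length rest (i + 1) used (cur + 1) cut

def extract_context_snippet_py_alt (content : String) (max_length : Int) : String :=
  if content = "" then ""
  else
    let cs := content.toList
    let cut := altScan max_length (cs ++ ['\n']) 0 0 0 none
    -- content[:cut] with cut a committed in-range Nat index = take cut
    let snippet := match cut with | none => [] | some p => cs.take p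
    if ((snippet.length : Int) < (cs.length : Int)) then String.ofList (snippet ++ "...".toList)
    else String.ofList snippet

-- ===== PRECONDITION & SPEC =====
def Spec_extract_context_snippet_py (content : String) (max_length : Int) (out : String) : Prop := out = extract_context_snippet_py_alt content max_length
instance (content : String) (max_length : Int) (out : String) : Decidable (Spec_extract_context_snippet_py content max_length out) := by unfold Spec_extract_context_snippet_py; infer_instance

-- ===== CLAIM (what is proved, stated in full; the proofs are below) =====
def Claim_equal_extract_context_snippet_py : Prop := ∀ (content : String) (max_length : Int), Dom_extract_context_snippet_py content max_length → Spec_extract_context_snippet_py content max_length (extract_context_snippet_py content max_length)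

-- ===== LEMMAS AND PROOFS =====

-- a simple structural recursion splitting on '\n', used to characterise PySem.Chars.splitOn
def mySplit : List Char → List (List Char)
  | [] => [[]]
  | c :: rest =>
    match mySplit rest with
    | [] => [[]]
    | h :: t => if c = '\n' then [] :: h :: t else (c :: h) :: t

theorem mySplit_ne_nil (cs : List Char) : mySplit cs ≠ [] := by
  cases cs with
  | nil => simp [mySplit]
  | cons c rest =>
    simp only [mySplit]
    cases mySplit rest with
    | nil => simp
    | cons h t => by_cases hc : c = '\n' <;> simp [hc]

theorem splitOn_go_spec (fuel : Nat) (l cur : List Char) (acc : List (List Char))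
    (h : l.length ≤ fuel) :
    PySem.Chars.splitOn.go ['\n'] fuel l cur acc =
      acc.reverse ++ (match mySplit l with
        | [] => [cur.reverse]
        | hd :: t => (cur.reverse ++ hd) :: t) := by
  induction fuel generalizing l cur acc with
  | zero =>
    have : l = [] := by cases l <;> simp_all
    subst this
    simp [PySem.Chars.splitOn.go, mySplit]
  | succ fuel ih =>
    cases l with
    | nil => simp [PySem.Chars.splitOn.go, mySplit]
    | cons c rest =>
      simp only [PySem.Chars.splitOn.go]
      by_cases hc : c = '\n'
      · have hpref : (['\n'] : List Char).isPrefixOf (c :: rest) = true := by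
          simp [List.isPrefixOf, hc]
        rw [if_pos hpref]
        have hlen : rest.length ≤ fuel := by simp at h; omega
        have := ih rest [] (cur.reverse :: acc) hlen
        have hdrop : List.drop (['\n'] : List Char).length (c :: rest) = rest := rfl
        rw [hdrop, this]
        rcases hsp : mySplit rest with _ | ⟨hd, t⟩
        · exact absurd hsp (mySplit_ne_nil rest)
        · simp [mySplit, hsp, hc]
      · have hpref : (['\n'] : List Char).isPrefixOf (c :: rest) = false := by
          simp [List.isPrefixOf]
          intro h'; exact absurd h'.symm hc
        rw [if_neg (by simp [hpref])]
        have hlen : rest.length ≤ fuel := by simp at h; omega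
        have := ih rest (c :: cur) acc hlen
        rw [this]
        rcases hsp : mySplit rest with _ | ⟨hd, t⟩
        · exact absurd hsp (mySplit_ne_nil rest)
        · simp [mySplit, hsp, hc]

theorem splitOn_eq_mySplit (cs : List Char) :
    PySem.Chars.splitOn cs ['\n'] = mySplit cs := by
  unfold PySem.Chars.splitOn
  rw [splitOn_go_spec cs.length.succ cs [] [] (by omega)]
  rcases hsp : mySplit cs with _ | ⟨hd, t⟩
  · exact absurd hsp (mySplit_ne_nil cs)
  · simp

theorem join_mySplit (cs : List Char) :
    PySem.Chars.join ['\n'] (mySplit cs) = cs := by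
  induction cs with
  | nil => simp [mySplit, PySem.Chars.join_singleton]
  | cons c rest ih =>
    rcases hsp : mySplit rest with _ | ⟨hd, t⟩
    · exact absurd hsp (mySplit_ne_nil rest)
    · rw [hsp] at ih
      have hms : mySplit (c :: rest) = if c = '\n' then [] :: hd :: t else (c :: hd) :: t := by
        simp [mySplit, hsp]
      rw [hms]
      by_cases hc : c = '\n'
      · rw [if_pos hc, PySem.Chars.join_cons_cons]
        simp [ih, hc]
      · rw [if_neg hc]
        cases t with
        | nil => rw [PySem.Chars.join_singleton] at ih ⊢; simp [ih]
        | cons q t' =>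
          rw [PySem.Chars.join_cons_cons] at ih ⊢
          simp [ih]

theorem mySplit_no_nl (cs : List Char) (h : '\n' ∉ cs) : mySplit cs = [cs] := by
  induction cs with
  | nil => simp [mySplit]
  | cons c rest ih =>
    have hc : c ≠ '\n' := by intro e; exact h (e ▸ List.mem_cons_self ..)
    have := ih (fun m => h (List.mem_cons_of_mem _ m))
    simp [mySplit, this, hc]

theorem mySplit_append (pre rest : List Char) (h : '\n' ∉ pre) :
    mySplit (pre ++ '\n' :: rest) = pre :: mySplit rest := by
  induction pre with
  | nil =>
    simp only [List.nil_append, mySplit]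
    rcases hsp : mySplit rest with _ | ⟨hd, t⟩
    · exact absurd hsp (mySplit_ne_nil rest)
    · simp
  | cons c pre' ih =>
    have hc : c ≠ '\n' := by intro e; exact h (e ▸ List.mem_cons_self ..)
    have := ih (fun m => h (List.mem_cons_of_mem _ m))
    simp [mySplit, this, hc]

theorem altScan_no_nl (max_length : Int) (pre l : List Char) (h : '\n' ∉ pre)
    (i : Nat) (used cur : Int) (cut : Option Nat) :
    altScan max_length (pre ++ l) i used cur cut
      = altScan max_length l (i + pre.length) used (cur + (pre.length : Int)) cut := by
  induction pre generalizing i cur with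
  | nil => simp
  | cons c pre' ih =>
    have hc : c ≠ '\n' := by intro e; exact h (e ▸ List.mem_cons_self ..)
    have h' : '\n' ∉ pre' := fun m => h (List.mem_cons_of_mem _ m)
    simp only [List.cons_append, altScan, if_neg hc]
    rw [ih h' (i + 1) (cur + 1)]
    have e1 : i + 1 + pre'.length = i + (c :: pre').length := by
      simp only [List.length_cons]; omega
    have e2 : cur + 1 + (pre'.length : Int) = cur + ((c :: pre').length : Int) := by
      simp only [List.length_cons]; push_cast; ring
    rw [e1, e2]

theorem pyA_take_prefix (max_length : Int) (lines : List (List Char)) (t : Int) :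
    pyA_take max_length lines t <+: lines := by
  induction lines generalizing t with
  | nil => simp [pyA_take]
  | cons l rest ih =>
    by_cases h : max_length < t + (l.length : Int)
    · simp [pyA_take, h]
    · simp only [pyA_take, if_neg h]
      exact List.cons_prefix_cons.mpr ⟨rfl, ih _⟩

theorem join_append_ne_nil (a : List Char) (t R : List (List Char)) :
    PySem.Chars.join ['\n'] ((a :: t) ++ R)
      = PySem.Chars.join ['\n'] (a :: t)
        ++ (match R with | [] => [] | _ :: _ => '\n' :: PySem.Chars.join ['\n'] R) := by
  induction t generalizing a with
  | nil =>
    cases R with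
    | nil => simp
    | cons r rs => rw [List.singleton_append, PySem.Chars.join_cons_cons, PySem.Chars.join_singleton]; simp
  | cons b t' ih =>
    rw [List.cons_append, List.cons_append, PySem.Chars.join_cons_cons,
        PySem.Chars.join_cons_cons, ← List.cons_append, ih b]
    simp

theorem join_prefix (L M : List (List Char)) (h : L <+: M) :
    PySem.Chars.join ['\n'] L <+: PySem.Chars.join ['\n'] M := by
  obtain ⟨R, rfl⟩ := h
  cases L with
  | nil => simp [PySem.Chars.join_nil]
  | cons a t =>
    rw [join_append_ne_nil a t R]
    exact List.prefix_append _ _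

-- MAIN: the char scan over cs ++ ['\n'] computes exactly A's kept-lines cut
theorem altScan_main (max_length : Int) :
    ∀ n (cs : List Char), cs.length = n → ∀ (i : Nat) (used : Int) (cut : Option Nat),
    altScan max_length (cs ++ ['\n']) i used 0 cut
      = (if pyA_take max_length (mySplit cs) used = [] then cut
         else some (i + (PySem.Chars.join ['\n'] (pyA_take max_length (mySplit cs) used)).length)) := by
  intro n
  induction n using Nat.strong_induction_on with
  | _ n ihn =>
    intro cs hlen i used cut
    rcases hdw : cs.dropWhile (· ≠ '\n') with _ | ⟨d, rest⟩
    · -- no newline in cs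
      have hpre : cs.takeWhile (fun c => decide (c ≠ '\n')) = cs := by
        have := List.takeWhile_append_dropWhile (p := fun c => decide (c ≠ '\n')) (l := cs)
        rw [hdw] at this; simpa using this
      have hnn : '\n' ∉ cs := by
        intro m
        rw [← hpre] at m
        have := List.mem_takeWhile_imp m
        simp at this
      rw [show cs ++ ['\n'] = cs ++ ['\n'] from rfl,
          altScan_no_nl max_length cs ['\n'] hnn i used 0 cut]
      simp only [altScan, mySplit_no_nl cs hnn, pyA_take, zero_add]
      by_cases hov : max_length < used + (cs.length : Int)
      · simp [hov]
      · simp [hov, PySem.Chars.join_singleton]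
    · -- cs = pre ++ '\n' :: rest with '\n' ∉ pre
      have hd' : d = '\n' := by
        have := List.head?_dropWhile_not (fun c => decide (c ≠ '\n')) cs
        rw [hdw] at this; simpa using this
      subst hd'
      obtain ⟨pre, hnn, hcs⟩ : ∃ pre, '\n' ∉ pre ∧ cs = pre ++ '\n' :: rest := by
        refine ⟨cs.takeWhile (fun c => decide (c ≠ '\n')), ?_, ?_⟩
        · intro m
          have := List.mem_takeWhile_imp m
          simp at this
        · conv_lhs => rw [← List.takeWhile_append_dropWhile (p := fun c => decide (c ≠ '\n')) (l := cs)]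
          rw [hdw]
      have hrest : rest.length < n := by
        rw [hcs] at hlen; simp at hlen; omega
      rw [hcs, show (pre ++ '\n' :: rest) ++ ['\n'] = pre ++ '\n' :: (rest ++ ['\n']) by simp,
          altScan_no_nl max_length pre _ hnn i used 0 cut]
      simp only [altScan, mySplit_append pre rest hnn, pyA_take, zero_add]
      by_cases hov : max_length < used + (pre.length : Int)
      · simp [hov]
      · rw [if_neg hov, if_neg hov,
            ihn rest.length hrest rest rfl (i + pre.length + 1) (used + (pre.length : Int)) (some (i + pre.length))]
        rcases hT : pyA_take max_length (mySplit rest) (used + (pre.length : Int)) with _ | ⟨h1, t1⟩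
        · simp [PySem.Chars.join_singleton]
        · simp only [if_true, reduceCtorEq, if_false, PySem.Chars.join_cons_cons,
              Option.some.injEq, List.length_append, List.length_cons, List.length_nil]
          omega

-- ===== VERDICT (by name: the statement is the Claim_ definition above) =====
theorem extract_context_snippet_py_spec : Claim_equal_extract_context_snippet_py := by
  intro content max_length _
  unfold Spec_extract_context_snippet_py extract_context_snippet_py extract_context_snippet_py_alt
  by_cases h : content = ""
  · simp [h]
  · simp only [h, if_false]
    rw [splitOn_eq_mySplit,
        altScan_main max_length content.toList.length content.toList rfl 0 0 none]
    rcases hL : pyA_take max_length (mySplit content.toList) 0 with _ | ⟨h1, t1⟩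
    · simp [PySem.Chars.join_nil]
    · have hpref : PySem.Chars.join ['\n'] (h1 :: t1) <+: content.toList := by
        have h1p : (h1 :: t1) <+: mySplit content.toList := hL ▸ pyA_take_prefix _ _ _
        have := join_prefix _ _ h1p
        rwa [join_mySplit] at this
      have htake : content.toList.take (PySem.Chars.join ['\n'] (h1 :: t1)).length
          = PySem.Chars.join ['\n'] (h1 :: t1) := (List.prefix_iff_eq_take.mp hpref).symm
      simp only [reduceCtorEq, if_false, Nat.zero_add]
      rw [htake]
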